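-- pv_equiv track=rewrite | github.com/saravanakumarrc/Architecture_Journey | web_search_ai_generator.py | extract_best_story
-- ===== SOURCE A (Python) =====
-- from typing import Dict, List, Optional
--
-- def extract_best_story(search_results: str) -> Dict[str, str]:
--     """
--     Extract the most interesting story from search results
--     """
--     lines = search_results.strip().split('\n')
--     stories = []
--
--     current_story = {}
--     for line in lines:
--         line = line.strip()
--         if line and line[0].isdigit() and ':' in line:
--             # New story found
--             if current_story:
--                 stories.append(current_story)
--
--             # Parse title and start description
--             parts = line.split(':', 1)
--             if len(parts) > 1:
--                 current_story = {
--                     'title': parts[1].strip(),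
--                     'description': ''
--                 }
--         elif current_story and line:
--             # Add to current story description
--             current_story['description'] += ' ' + line
--
--     # Add last story
--     if current_story:
--         stories.append(current_story)
--
--     # Select the first/most interesting story
--     if stories:
--         selected = stories[0]
--         return {
--             'title': selected['title'],
--             'description': selected['description'].strip()
--         }
--
--     # Fallback if parsing fails
--     return {
--         'title': 'AI Technology Advances Continue',
--         'description': 'The AI industry continues to make rapid progress with new models, tools, and capabilities being released regularly.'
--     }
-- ===== SOURCE B (Python) =====
-- def extract_best_story(search_results: str):
--     lines = [ln.strip() for ln in search_results.strip().split('\n')]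
--
--     def is_header(l):
--         return bool(l) and l[0].isdigit() and ':' in l
--
--     start = next((i for i, l in enumerate(lines) if is_header(l)), None)
--     if start is None:
--         return {
--             'title': 'AI Technology Advances Continue',
--             'description': 'The AI industry continues to make rapid progress with new models, tools, and capabilities being released regularly.'
--         }
--     title = lines[start].split(':', 1)[1].strip()
--     body = []
--     for l in lines[start + 1:]:
--         if is_header(l):
--             break
--         if l:
--             body.append(l)
--     return {'title': title, 'description': ' '.join(body)}
-- ===== Notes on version B (the rewrite author's own statement) =====
-- stated objective: simpler
-- what changed: B drops A's build-every-story-then-take-the-first accumulator loop and instead does a two-phase scan: find the first header line and take its title, then collect the non-empty lines up to the next header and join them for the description.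
import Mathlib
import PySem

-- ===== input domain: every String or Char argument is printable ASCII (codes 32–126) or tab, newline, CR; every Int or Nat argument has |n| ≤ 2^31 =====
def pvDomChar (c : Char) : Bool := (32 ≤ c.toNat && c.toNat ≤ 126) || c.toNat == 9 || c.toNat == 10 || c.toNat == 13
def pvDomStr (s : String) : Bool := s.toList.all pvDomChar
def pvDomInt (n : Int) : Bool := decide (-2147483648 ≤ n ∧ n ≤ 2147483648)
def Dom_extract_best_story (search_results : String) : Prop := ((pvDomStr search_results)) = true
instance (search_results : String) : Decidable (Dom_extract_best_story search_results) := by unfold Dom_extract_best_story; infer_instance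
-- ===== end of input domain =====

-- B replaces A's build-all-stories-then-take-the-first loop by a simpler two-phase scan
-- (find the first header, then collect body lines up to the next header and join them);
-- objective: simpler. Both ports work on List Char via PySem.Chars (exact wrappers).

-- ===== PORT A =====
-- 'line and line[0].isdigit() and ":" in line' (both Pythons contain this very test)
def pvIsHeader (l : List Char) : Bool :=
  decide (l ≠ []) && ((PySem.List.pyGet? l 0).map PySem.Chars.isdigit).getD false
    && PySem.Chars.isIn [':'] l

-- 'if current_story: stories.append(current_story)' (current_story modelled as Option)
def pvStories (r : List (List Char × List Char) × Option (List Char × List Char)) :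
    List (List Char × List Char) :=
  match r.2 with
  | some cs => r.1 ++ [cs]
  | none => r.1

-- A's loop body applied to the already-stripped line l
def pvBodyA (st : List (List Char × List Char) × Option (List Char × List Char))
    (l : List Char) : List (List Char × List Char) × Option (List Char × List Char) :=
  if pvIsHeader l then
    let stories := pvStories st
    let parts := PySem.Chars.splitOnMax l [':'] 1
    if 1 < parts.length then
      (stories, some (PySem.Chars.strip (parts.getD 1 []), []))
    else (stories, st.2)
  else
    match st.2 with
    | some (t, d) => if l ≠ [] then (st.1, some (t, d ++ ' ' :: l)) else st
    | none => st

-- A's loop body: 'line = line.strip()' then the branches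
def pvStepA (st : List (List Char × List Char) × Option (List Char × List Char))
    (line : List Char) : List (List Char × List Char) × Option (List Char × List Char) :=
  pvBodyA st (PySem.Chars.strip line)

def extract_best_story (search_results : String) : List (String × String) :=
  match pvStories (List.foldl pvStepA ([], none)
      (PySem.Chars.splitOn (PySem.Chars.strip search_results.toList) ['\n'])) with
  | (t, d) :: _ => [("title", String.ofList t), ("description", String.ofList (PySem.Chars.strip d))]
  | [] => [("title", "AI Technology Advances Continue"),
           ("description", "The AI industry continues to make rapid progress with new models, tools, and capabilities being released regularly.")]

-- ===== PORT B =====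
-- 'lines[start].split(":", 1)[1].strip()'
def pvTitleOf (l : List Char) : List Char :=
  PySem.Chars.strip ((PySem.Chars.splitOnMax l [':'] 1).getD 1 [])

-- phase 1: first header line and the lines after it
def pvFindHeader : List (List Char) → Option (List Char × List (List Char))
  | [] => none
  | l :: ls => if pvIsHeader l then some (pvTitleOf l, ls) else pvFindHeader ls

-- phase 2: non-empty lines up to (not including) the next header
def pvCollect : List (List Char) → List (List Char)
  | [] => []
  | l :: ls => if pvIsHeader l then [] else if l ≠ [] then l :: pvCollect ls else pvCollect ls

def extract_best_story_alt (search_results : String) : List (String × String) :=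
  match pvFindHeader ((PySem.Chars.splitOn (PySem.Chars.strip search_results.toList) ['\n']).map
      PySem.Chars.strip) with
  | some (t, rest) =>
      [("title", String.ofList t),
       ("description", String.ofList (PySem.Chars.join [' '] (pvCollect rest)))]
  | none => [("title", "AI Technology Advances Continue"),
             ("description", "The AI industry continues to make rapid progress with new models, tools, and capabilities being released regularly.")]

-- ===== PRECONDITION & SPEC =====
def Spec_extract_best_story (search_results : String) (out : List (String × String)) : Prop := out = extract_best_story_alt search_results
instance (search_results : String) (out : List (String × String)) : Decidable (Spec_extract_best_story search_results out) := by unfold Spec_extract_best_story; infer_instance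

-- ===== CLAIM (what is proved, stated in full; the proofs are below) =====
def Claim_equal_extract_best_story : Prop := ∀ (search_results : String), Dom_extract_best_story search_results → Spec_extract_best_story search_results (extract_best_story search_results)

-- ===== LEMMAS AND PROOFS =====

-- A's accumulated description of the first story, over the stripped lines after its header
def pvApp : List (List Char) → List Char
  | [] => []
  | l :: ls => if pvIsHeader l then [] else if l ≠ [] then ' ' :: l ++ pvApp ls else pvApp ls

-- splitOnMax.go with maxsplit exhausted returns the single remaining piece
theorem pv_goZero (sep : List Char) (fuel : Nat) (l cur : List Char) (acc : List (List Char)) :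
    PySem.Chars.splitOnMax.go sep fuel 0 l cur acc = ((cur.reverse ++ l) :: acc).reverse := by
  cases fuel with
  | zero => rfl
  | succ n => cases l with
    | nil => simp [PySem.Chars.splitOnMax.go]
    | cons c rest => simp [PySem.Chars.splitOnMax.go]

-- length of a 1-split: 2 pieces when the separator char occurs, 1 otherwise
theorem pv_goLen (c : Char) (fuel : Nat) (l cur : List Char) (acc : List (List Char))
    (h : l.length < fuel) :
    (PySem.Chars.splitOnMax.go [c] fuel 1 l cur acc).length
      = acc.length + (if c ∈ l then 2 else 1) := by
  induction fuel generalizing l cur acc with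
  | zero => omega
  | succ n ih =>
    cases l with
    | nil => simp [PySem.Chars.splitOnMax.go]
    | cons ch rest =>
      rw [show PySem.Chars.splitOnMax.go [c] (n+1) 1 (ch :: rest) cur acc
            = if [c].isPrefixOf (ch :: rest) = true then
                PySem.Chars.splitOnMax.go [c] n 0 (List.drop 1 (ch :: rest)) [] (cur.reverse :: acc)
              else PySem.Chars.splitOnMax.go [c] n 1 rest (ch :: cur) acc from by
        simp [PySem.Chars.splitOnMax.go]]
      by_cases hp : [c].isPrefixOf (ch :: rest) = true
      · have hc : ch = c := ((by simpa [List.isPrefixOf] using hp : c = ch)).symm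
        rw [if_pos hp, pv_goZero]
        subst hc
        simp
      · have hcc : ch ≠ c := by intro hh; subst hh; simp [List.isPrefixOf] at hp
        rw [if_neg hp, ih rest (ch :: cur) acc (by simp at h; omega)]
        have : ¬ (c = ch) := fun hh => hcc hh.symm
        simp [List.mem_cons, this]

theorem pv_split_two (l : List Char) (h : ':' ∈ l) :
    1 < (PySem.Chars.splitOnMax l [':'] 1).length := by
  unfold PySem.Chars.splitOnMax
  norm_num
  rw [pv_goLen ':' (l.length + 1) l [] [] (by omega)]
  simp [h]

theorem pv_header_colon (l : List Char) (h : pvIsHeader l = true) : ':' ∈ l := by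
  simp only [pvIsHeader, Bool.and_eq_true] at h
  exact (List.singleton_infix_iff _ _).mp ((PySem.Chars.isIn_iff_infix _ _).mp h.2)

-- strip facts
theorem pv_head_dropWhile (p : Char → Bool) (l : List Char) (c : Char)
    (h : (List.dropWhile p l).head? = some c) : p c = false := by
  induction l with
  | nil => simp at h
  | cons a t ih =>
    rw [List.dropWhile_cons] at h
    by_cases hp : p a
    · simp [hp] at h; exact ih h
    · simp [hp] at h; simpa [← h] using hp

theorem pv_lstrip_eq_self (l : List Char)
    (h : ∀ c, l.head? = some c → PySem.Chars.isspace c = false) :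
    PySem.Chars.lstrip l = l := by
  cases l with
  | nil => rfl
  | cons a t =>
    unfold PySem.Chars.lstrip
    rw [List.dropWhile_cons, if_neg (by simp [h a rfl])]

theorem pv_rstrip_eq_self (l : List Char)
    (h : ∀ c, l.getLast? = some c → PySem.Chars.isspace c = false) :
    PySem.Chars.rstrip l = l := by
  unfold PySem.Chars.rstrip
  rw [show List.dropWhile PySem.Chars.isspace l.reverse = PySem.Chars.lstrip l.reverse from rfl,
      pv_lstrip_eq_self _ (by intro c hc; exact h c (by rwa [List.head?_reverse] at hc)),
      List.reverse_reverse]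

theorem pv_strip_head (z : List Char) (c : Char)
    (h : (PySem.Chars.strip z).head? = some c) : PySem.Chars.isspace c = false := by
  unfold PySem.Chars.strip PySem.Chars.rstrip at h
  rw [List.head?_reverse] at h
  have hne : List.dropWhile PySem.Chars.isspace (PySem.Chars.lstrip z).reverse ≠ [] := by
    intro he; rw [he] at h; simp at h
  obtain ⟨u, hu⟩ := List.dropWhile_suffix (l := (PySem.Chars.lstrip z).reverse) PySem.Chars.isspace
  have hw : (PySem.Chars.lstrip z).reverse.getLast? = some c := by
    rw [← hu, List.getLast?_append_of_ne_nil _ hne]; exact h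
  rw [List.getLast?_reverse] at hw
  exact pv_head_dropWhile _ _ _ hw

theorem pv_strip_getLast (z : List Char) (c : Char)
    (h : (PySem.Chars.strip z).getLast? = some c) : PySem.Chars.isspace c = false := by
  unfold PySem.Chars.strip PySem.Chars.rstrip at h
  rw [List.getLast?_reverse] at h
  exact pv_head_dropWhile _ _ _ h

-- join vs accumulated ' '-prefixed pieces
theorem pv_flatMap_getLast (cs : List (List Char))
    (hcs : ∀ c ∈ cs, c ≠ [] ∧ ∃ z, c = PySem.Chars.strip z) (ch : Char)
    (h : (cs.flatMap (fun c => ' ' :: c)).getLast? = some ch) :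
    PySem.Chars.isspace ch = false := by
  induction cs with
  | nil => simp at h
  | cons c cs ih =>
    rw [List.flatMap_cons, List.getLast?_append] at h
    by_cases hnil : cs.flatMap (fun c => ' ' :: c) = []
    · rw [hnil] at h
      simp only [List.getLast?_nil, Option.none_or] at h
      obtain ⟨hc, z, hz⟩ := hcs c List.mem_cons_self
      rw [show (' ' :: c) = [' '] ++ c from rfl, List.getLast?_append_of_ne_nil _ hc] at h
      exact pv_strip_getLast z ch (by rw [← hz]; exact h)
    · cases hgl : (cs.flatMap (fun c => ' ' :: c)).getLast? with
      | none => exact absurd (List.getLast?_eq_none_iff.mp hgl) hnil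
      | some x =>
        rw [hgl, Option.some_or] at h
        obtain rfl : x = ch := by simpa using h
        exact ih (fun y hy => hcs y (List.mem_cons_of_mem _ hy)) hgl

theorem pv_join_eq (c : List Char) (cs : List (List Char)) :
    PySem.Chars.join [' '] (c :: cs) = c ++ cs.flatMap (fun x => ' ' :: x) := by
  induction cs generalizing c with
  | nil => simp [PySem.Chars.join_singleton]
  | cons c2 cs2 ih =>
    rw [PySem.Chars.join_cons_cons, ih c2]
    simp

theorem pv_strip_flatMap (cs : List (List Char))
    (hcs : ∀ c ∈ cs, c ≠ [] ∧ ∃ z, c = PySem.Chars.strip z) :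
    PySem.Chars.strip (cs.flatMap (fun c => ' ' :: c)) = PySem.Chars.join [' '] cs := by
  cases cs with
  | nil => rw [PySem.Chars.join_nil]; rfl
  | cons c cs =>
    obtain ⟨hc, z, hz⟩ := hcs c List.mem_cons_self
    have hx : c ++ cs.flatMap (fun x => ' ' :: x) ≠ [] := by
      intro he; exact hc (List.append_eq_nil_iff.mp he).1
    have hflat : (c :: cs).flatMap (fun x => ' ' :: x)
        = ' ' :: (c ++ cs.flatMap (fun x => ' ' :: x)) := by simp
    rw [hflat, pv_join_eq]
    -- strip drops exactly the leading blank: head and last of the rest are non-space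
    unfold PySem.Chars.strip
    have hl : PySem.Chars.lstrip (' ' :: (c ++ cs.flatMap (fun x => ' ' :: x)))
        = c ++ cs.flatMap (fun x => ' ' :: x) := by
      unfold PySem.Chars.lstrip
      rw [List.dropWhile_cons, if_pos (by decide)]
      rw [show List.dropWhile PySem.Chars.isspace (c ++ cs.flatMap (fun x => ' ' :: x))
            = PySem.Chars.lstrip (c ++ cs.flatMap (fun x => ' ' :: x)) from rfl]
      apply pv_lstrip_eq_self
      intro ch hch
      cases c with
      | nil => exact absurd rfl hc
      | cons c0 ct =>
        have hpc : c0 = ch := by simpa using hch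
        rw [← hpc]
        exact pv_strip_head z c0 (by rw [← hz]; rfl)
    rw [hl]
    apply pv_rstrip_eq_self
    intro ch hch
    apply pv_flatMap_getLast (c :: cs) hcs ch
    rw [hflat, show (' ' :: (c ++ cs.flatMap (fun x => ' ' :: x)))
          = [' '] ++ (c ++ cs.flatMap (fun x => ' ' :: x)) from rfl,
        List.getLast?_append_of_ne_nil _ hx]
    exact hch

theorem pv_app_eq_flatMap (ls : List (List Char)) :
    pvApp ls = (pvCollect ls).flatMap (fun c => ' ' :: c) := by
  induction ls with
  | nil => rfl
  | cons l ls ih =>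
    unfold pvApp pvCollect
    split_ifs with h1 h2 <;> simp [ih]

theorem pv_collect_mem (ls : List (List Char)) (c : List Char) (h : c ∈ pvCollect ls) :
    c ∈ ls ∧ c ≠ [] := by
  induction ls with
  | nil => simp [pvCollect] at h
  | cons l ls ih =>
    unfold pvCollect at h
    split_ifs at h with h1 h2
    · simp at h
    · rcases List.mem_cons.mp h with rfl | h3
      · exact ⟨List.mem_cons_self, h2⟩
      · exact ⟨List.mem_cons_of_mem _ (ih h3).1, (ih h3).2⟩
    · exact ⟨List.mem_cons_of_mem _ (ih h).1, (ih h).2⟩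

-- once the stories list is nonempty its head never changes
theorem pv_foldl_head (ls : List (List Char)) (p : List Char × List Char)
    (st : List (List Char × List Char)) (cur : Option (List Char × List Char)) :
    ∃ tl, (List.foldl pvBodyA (p :: st, cur) ls).1 = p :: tl := by
  induction ls generalizing st cur with
  | nil => exact ⟨st, rfl⟩
  | cons l ls ih =>
    have hb : ∃ tl', (pvBodyA (p :: st, cur) l).1 = p :: tl' := by
      cases cur with
      | none =>
        by_cases hh : pvIsHeader l = true
        · by_cases hp : 1 < (PySem.Chars.splitOnMax l [':'] 1).length <;>
            simp [pvBodyA, pvStories, hh, hp]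
        · simp [pvBodyA, hh]
      | some cs =>
        obtain ⟨t, d⟩ := cs
        by_cases hh : pvIsHeader l = true
        · by_cases hp : 1 < (PySem.Chars.splitOnMax l [':'] 1).length <;>
            simp [pvBodyA, pvStories, hh, hp]
        · by_cases hl : l = []
          · subst hl; simp [pvBodyA, hh]
          · simp [pvBodyA, hh, hl]
    obtain ⟨tl', htl'⟩ := hb
    rw [List.foldl_cons]
    have := ih tl' (pvBodyA (p :: st, cur) l).2
    rwa [← htl'] at this

-- fold from an open current story: the first story is (t, d ++ pvApp ls)
theorem pv_foldl_open (ls : List (List Char)) (t d : List Char) :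
    (pvStories (List.foldl pvBodyA ([], some (t, d)) ls)).head? = some (t, d ++ pvApp ls) := by
  induction ls generalizing d with
  | nil => simp [pvStories, pvApp]
  | cons l ls ih =>
    by_cases hh : pvIsHeader l = true
    · have hstep : ∃ X, pvBodyA ([], some (t, d)) l = ([(t, d)], X) := by
        refine ⟨if 1 < (PySem.Chars.splitOnMax l [':'] 1).length then
            some (PySem.Chars.strip ((PySem.Chars.splitOnMax l [':'] 1).getD 1 []), [])
          else some (t, d), ?_⟩
        by_cases hp : 1 < (PySem.Chars.splitOnMax l [':'] 1).length <;>
          simp [pvBodyA, pvStories, hh, hp]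
      obtain ⟨X, hX⟩ := hstep
      rw [List.foldl_cons, hX]
      obtain ⟨tl, htl⟩ := pv_foldl_head ls (t, d) [] X
      have happ : pvApp (l :: ls) = [] := by simp only [pvApp]; rw [if_pos hh]
      rw [happ, List.append_nil]
      unfold pvStories
      cases hsnd : (List.foldl pvBodyA ([(t, d)], X) ls).2 <;> simp [htl]
    · by_cases hl : l = []
      · have hstep : pvBodyA ([], some (t, d)) l = ([], some (t, d)) := by
          subst hl; simp [pvBodyA, hh]
        rw [List.foldl_cons, hstep, ih d]
        simp only [pvApp]
        rw [if_neg hh, if_neg (by simpa using hl)]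
      · have hstep : pvBodyA ([], some (t, d)) l = ([], some (t, d ++ ' ' :: l)) := by
          simp [pvBodyA, hh, hl]
        rw [List.foldl_cons, hstep, ih (d ++ ' ' :: l)]
        simp only [pvApp]
        rw [if_neg hh, if_pos (by simpa using hl)]
        simp

-- master lemma: A's finalized fold = B's two-phase scan, over stripped lines
theorem pv_main (ls : List (List Char))
    (hs : ∀ l ∈ ls, ∃ z, l = PySem.Chars.strip z) :
    (match pvStories (List.foldl pvBodyA ([], none) ls) with
      | (t, d) :: _ => [("title", String.ofList t), ("description", String.ofList (PySem.Chars.strip d))]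
      | [] => ([("title", "AI Technology Advances Continue"),
           ("description", "The AI industry continues to make rapid progress with new models, tools, and capabilities being released regularly.")] : List (String × String)))
    = match pvFindHeader ls with
      | some (t, rest) =>
          [("title", String.ofList t),
           ("description", String.ofList (PySem.Chars.join [' '] (pvCollect rest)))]
      | none => [("title", "AI Technology Advances Continue"),
             ("description", "The AI industry continues to make rapid progress with new models, tools, and capabilities being released regularly.")] := by
  induction ls with
  | nil => rfl
  | cons l ls ih =>
    by_cases hh : pvIsHeader l = true
    · have hp := pv_split_two l (pv_header_colon l hh)
      have hstep : pvBodyA ([], none) l = ([], some (pvTitleOf l, [])) := by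
        simp [pvBodyA, pvStories, pvTitleOf, hh, hp]
      rw [List.foldl_cons, hstep]
      have hopen := pv_foldl_open ls (pvTitleOf l) []
      rw [List.nil_append] at hopen
      obtain ⟨rest, hrest⟩ : ∃ rest, pvStories (List.foldl pvBodyA ([], some (pvTitleOf l, [])) ls)
          = (pvTitleOf l, pvApp ls) :: rest := by
        cases hq : pvStories (List.foldl pvBodyA ([], some (pvTitleOf l, [])) ls) with
        | nil => rw [hq] at hopen; simp at hopen
        | cons a r =>
          rw [hq] at hopen
          simp only [List.head?_cons, Option.some.injEq] at hopen
          exact ⟨r, by rw [hopen]⟩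
      rw [hrest]
      have hfh : pvFindHeader (l :: ls) = some (pvTitleOf l, ls) := by
        simp [pvFindHeader, hh]
      rw [hfh]
      have hdesc : PySem.Chars.strip (pvApp ls) = PySem.Chars.join [' '] (pvCollect ls) := by
        rw [pv_app_eq_flatMap]
        refine pv_strip_flatMap _ (fun c hc => ⟨(pv_collect_mem ls c hc).2, ?_⟩)
        exact hs c (List.mem_cons_of_mem _ (pv_collect_mem ls c hc).1)
      simp [hdesc]
    · have hstep : pvBodyA ([], none) l = ([], none) := by simp [pvBodyA, hh]
      have hfh : pvFindHeader (l :: ls) = pvFindHeader ls := by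
        simp [pvFindHeader, hh]
      rw [List.foldl_cons, hstep, hfh]
      exact ih (fun x hx => hs x (List.mem_cons_of_mem _ hx))

-- ===== VERDICT (by name: the statement is the Claim_ definition above) =====
theorem extract_best_story_spec : Claim_equal_extract_best_story := by
  intro s _
  unfold Spec_extract_best_story extract_best_story extract_best_story_alt
  rw [show ∀ (init : List (List Char × List Char) × Option (List Char × List Char)) lines,
        List.foldl pvStepA init lines
        = List.foldl pvBodyA init (lines.map PySem.Chars.strip) from
      fun init lines =>
        (show List.foldl (fun st line => pvBodyA st (PySem.Chars.strip line)) init lines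
            = List.foldl pvBodyA init (lines.map PySem.Chars.strip) from List.foldl_map.symm)]
  exact pv_main _ (by intro l hl; simp only [List.mem_map] at hl; obtain ⟨z, _, rfl⟩ := hl; exact ⟨z, rfl⟩)
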